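-- pv_equiv track=rewrite | github.com/zhouchanghai/problem_ans | codility/2018Zinc.py | solution
-- ===== SOURCE A (Python) =====
-- def solution(A):
--     n = len(A)
--     if n < 3: return 0
--
--     visited = [0]*(n+1)
--     #distinct numbers in A[0 ... i]
--     singles = [0]*n
--     singles[0] = 1
--     visited[A[0]] = 1
--     for i in range(1,n):
--         if visited[A[i]]:
--             singles[i] = singles[i-1]
--         else:
--             singles[i] = singles[i-1] + 1
--             visited[A[i]] = 1
--
--     pairs = getTuples(A, singles, 2)
--     triples = getTuples(A, pairs, 3)
--     return triples[-1] % 1000000007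
--
-- def getTuples(A, tuples, newSize):
--     n = len(A)
--     result = [0]*n
--     # pos[i] is the previous position of A[i]
--     pos = [-1]*(n+1)
--
--     # count of new size tuples end at i is tuple[i-1]
--     for i in range(newSize-1, n):
--         num = A[i]
--         if pos[num] < 0:
--             result[i] = result[i-1] + tuples[i-1]
--         else:
--             result[i] = result[i-1] + tuples[i-1] - tuples[pos[num] - 1]
--         pos[num] = i
--     return result
-- ===== SOURCE B (Python) =====
-- def solution(A):
--     n = len(A)
--     if n < 3:
--         return 0
--     s = p = t = 0
--     seen = [False] * (n + 1)
--     sub_s = [0] * (n + 1)  # singles running value captured just before this value's last occurrence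
--     sub_p = [0] * (n + 1)  # pairs running value captured just before this value's last occurrence
--     for v in A:
--         ns = s if seen[v] else s + 1
--         np = p + s - sub_s[v]
--         nt = t + p - sub_p[v]
--         seen[v] = True
--         sub_s[v] = s
--         sub_p[v] = p
--         s, p, t = ns, np, nt
--     return t % 1000000007
-- ===== Notes on version B (the rewrite author's own statement) =====
-- stated objective: alternative
-- what changed: B fuses A's three sequential array-building passes (singles array, then pairs and triples arrays via getTuples) into a single loop over the input that keeps only three running scalar counters plus value-indexed arrays of the singles/pairs prefix values captured just before each value's previous occurrence; a timing run could not measure a speed ratio, so no speed is claimed.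
import Mathlib
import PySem

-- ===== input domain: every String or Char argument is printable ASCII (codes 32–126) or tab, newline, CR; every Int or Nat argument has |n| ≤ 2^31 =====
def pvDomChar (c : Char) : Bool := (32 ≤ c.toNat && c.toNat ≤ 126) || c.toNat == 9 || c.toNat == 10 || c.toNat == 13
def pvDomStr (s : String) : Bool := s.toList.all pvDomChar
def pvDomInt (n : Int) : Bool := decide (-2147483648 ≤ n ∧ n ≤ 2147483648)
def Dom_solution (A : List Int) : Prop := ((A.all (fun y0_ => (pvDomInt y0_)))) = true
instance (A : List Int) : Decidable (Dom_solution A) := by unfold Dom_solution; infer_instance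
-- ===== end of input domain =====

-- B fuses A's three array-building passes into one single loop with scalar counters and per-value captured prefix values.
-- ===== PORT A =====
-- loop body of getTuples's for-loop, named for the proofs; a literal transliteration
def getTuplesStep (A tuples : List Int) (st : List Int × List Int) (i : Int) :
    List Int × List Int :=
  let num := PySem.List.pyGetD A i 0
  let result :=
    if PySem.List.pyGetD st.2 num 0 < 0 then
      PySem.List.pySetD st.1 i
        (PySem.List.pyGetD st.1 (i - 1) 0 + PySem.List.pyGetD tuples (i - 1) 0)
    else
      PySem.List.pySetD st.1 i
        (PySem.List.pyGetD st.1 (i - 1) 0 + PySem.List.pyGetD tuples (i - 1) 0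
          - PySem.List.pyGetD tuples (PySem.List.pyGetD st.2 num 0 - 1) 0)
  (result, PySem.List.pySetD st.2 num i)

def getTuples (A tuples : List Int) (newSize : Int) : List Int :=
  let n : Int := (A.length : Int)
  let result : List Int := List.replicate A.length 0
  let pos : List Int := List.replicate (A.length + 1) (-1)
  ((PySem.List.pyRange (newSize - 1) n 1).foldl (getTuplesStep A tuples) (result, pos)).1

-- loop body of solution's singles loop, named for the proofs; a literal transliteration
def singlesStep (A : List Int) (st : List Int × List Int) (i : Int) :
    List Int × List Int :=
  if PySem.List.pyGetD st.2 (PySem.List.pyGetD A i 0) 0 ≠ 0 then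
    (PySem.List.pySetD st.1 i (PySem.List.pyGetD st.1 (i - 1) 0), st.2)
  else
    (PySem.List.pySetD st.1 i (PySem.List.pyGetD st.1 (i - 1) 0 + 1),
      PySem.List.pySetD st.2 (PySem.List.pyGetD A i 0) 1)

def solution (A : List Int) : Int :=
  let n : Int := (A.length : Int)
  if n < 3 then 0
  else
    let visited : List Int := List.replicate (A.length + 1) 0
    let singles : List Int := List.replicate A.length 0
    let singles := PySem.List.pySetD singles 0 1
    let visited := PySem.List.pySetD visited (PySem.List.pyGetD A 0 0) 1
    let singles :=
      ((PySem.List.pyRange 1 n 1).foldl (singlesStep A) (singles, visited)).1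
    let pairs := getTuples A singles 2
    let triples := getTuples A pairs 3
    PySem.Int.mod (PySem.List.pyGetD triples (-1) 0) 1000000007

-- ===== PORT B =====
-- loop body of B's single fused pass; state = (s, p, t, seen, sub_s, sub_p)
def altStep (st : Int × Int × Int × List Bool × List Int × List Int) (v : Int) :
    Int × Int × Int × List Bool × List Int × List Int :=
  let s := st.1
  let p := st.2.1
  let t := st.2.2.1
  let seen := st.2.2.2.1
  let subS := st.2.2.2.2.1
  let subP := st.2.2.2.2.2
  let ns := if PySem.List.pyGetD seen v false then s else s + 1
  let np := p + s - PySem.List.pyGetD subS v 0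
  let nt := t + p - PySem.List.pyGetD subP v 0
  (ns, np, nt, PySem.List.pySetD seen v true, PySem.List.pySetD subS v s,
    PySem.List.pySetD subP v p)

def solution_alt (A : List Int) : Int :=
  let n := A.length
  if n < 3 then 0
  else
    let st := A.foldl altStep
      (0, 0, 0, List.replicate (n + 1) false, List.replicate (n + 1) 0,
        List.replicate (n + 1) 0)
    PySem.Int.mod st.2.2.1 1000000007

-- ===== PRECONDITION & SPEC =====
-- Pre_ excludes exactly the inputs where Python A raises IndexError: some element outside
-- [-(n+1), n], the valid index range of A's size-(n+1) value-indexed arrays (only reached when n ≥ 3).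
def Pre_solution (A : List Int) : Prop :=
  3 ≤ A.length → ∀ v ∈ A, -((A.length : Int) + 1) ≤ v ∧ v ≤ (A.length : Int)
instance (A : List Int) : Decidable (Pre_solution A) := by unfold Pre_solution; infer_instance
def pvWitness_solution : List Int := [1, 2, 1, 3]
def Spec_solution (A : List Int) (out : Int) : Prop := out = solution_alt A
instance (A : List Int) (out : Int) : Decidable (Spec_solution A out) := by unfold Spec_solution; infer_instance

-- ===== CLAIM (what is proved, stated in full; the proofs are below) =====
def Claim_equal_solution : Prop := ∀ (A : List Int), Dom_solution A → Pre_solution A → Spec_solution A (solution A)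

-- ===== LEMMAS AND PROOFS =====

-- A[k] as an Int, and its wrapped (Python negative-index) position in a size-(n+1) array
def aAt (A : List Int) (k : ℕ) : Int := A.getD k 0
def wIdx (N : ℕ) (v : Int) : ℕ := if 0 ≤ v then v.toNat else N - (-v).toNat
def wa (A : List Int) (k : ℕ) : ℕ := wIdx (A.length + 1) (aAt A k)

-- last index j with lo ≤ j < k and wa A j = m
def lastIn (A : List Int) (lo : ℕ) : ℕ → ℕ → Option ℕ
  | 0, _ => none
  | k + 1, m => if lo ≤ k ∧ wa A k = m then some k else lastIn A lo k m

def subv (f : ℕ → Int) : Option ℕ → Int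
  | none => 0
  | some j => f j

-- reference recurrences: SS k = #distinct values in the first k elements,
-- Gof F k = the next-level tuple count after k elements
def SS (A : List Int) : ℕ → Int
  | 0 => 0
  | k + 1 => SS A k + (if (lastIn A 0 k (wa A k)).isSome then 0 else 1)

def Gof (A : List Int) (F : ℕ → Int) : ℕ → Int
  | 0 => 0
  | k + 1 => Gof A F k + F k - subv F (lastIn A 0 k (wa A k))

def PP (A : List Int) : ℕ → Int := Gof A (SS A)
def TT (A : List Int) : ℕ → Int := Gof A (PP A)

-- value-indexed spec arrays
def visSpec (A : List Int) (k : ℕ) : List Int :=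
  (List.range (A.length + 1)).map (fun m => if (lastIn A 0 k m).isSome then 1 else 0)
def seenSpec (A : List Int) (k : ℕ) : List Bool :=
  (List.range (A.length + 1)).map (fun m => (lastIn A 0 k m).isSome)
def subSpec (A : List Int) (f : ℕ → Int) (k : ℕ) : List Int :=
  (List.range (A.length + 1)).map (fun m => subv f (lastIn A 0 k m))
def posSpec (A : List Int) (lo k : ℕ) : List Int :=
  (List.range (A.length + 1)).map (fun m => (lastIn A lo k m).elim (-1) (fun j => (j : Int)))
def arrSpec (A : List Int) (G : ℕ → Int) (k : ℕ) : List Int :=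
  (List.range A.length).map (fun i => if i < k then G (i + 1) else 0)

-- bounds hypothesis used throughout
def InB (A : List Int) : Prop :=
  ∀ j < A.length, -((A.length : Int) + 1) ≤ aAt A j ∧ aAt A j ≤ (A.length : Int)

theorem wIdx_lt (N : ℕ) (v : Int) (_h1 : -(N : Int) ≤ v) (h2 : v < (N : Int)) (h0 : 0 < N) :
    wIdx N v < N := by
  unfold wIdx; split <;> omega
theorem pyGetD_w {α : Type} (xs : List α) (N : ℕ) (v : Int) (d : α) (hlen : xs.length = N)
    (h1 : -(N : Int) ≤ v) (h2 : v < (N : Int)) :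
    PySem.List.pyGetD xs v d = xs.getD (wIdx N v) d := by
  simp only [PySem.List.pyGetD, PySem.List.pyGet?, PySem.List.pyIdx?, wIdx, hlen,
    List.getD_eq_getElem?_getD]
  split_ifs <;> simp_all

theorem pySetD_w {α : Type} (xs : List α) (N : ℕ) (v : Int) (x : α) (hlen : xs.length = N)
    (h1 : -(N : Int) ≤ v) (h2 : v < (N : Int)) :
    PySem.List.pySetD xs v x = xs.set (wIdx N v) x := by
  simp only [PySem.List.pySetD, PySem.List.pySet?, PySem.List.pyIdx?, wIdx, hlen]
  split_ifs <;> simp_all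

theorem set_map_range {α : Type} (N : ℕ) (f : ℕ → α) (i : ℕ) (v : α) :
    ((List.range N).map f).set i v
      = (List.range N).map (fun m => if m = i then v else f m) := by
  apply List.ext_getElem
  · simp
  · intro j hj hj'
    simp only [List.getElem_set, List.getElem_map, List.getElem_range]
    by_cases h : i = j
    · subst h; simp
    · rw [if_neg h, if_neg (by omega)]

theorem lastIn_none_of_le (A : List Int) (lo k m : ℕ) (h : k ≤ lo) :
    lastIn A lo k m = none := by
  induction k with
  | zero => rfl
  | succ k ih => rw [lastIn, if_neg (by omega), ih (by omega)]

theorem lastIn_bounds (A : List Int) (lo : ℕ) :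
    ∀ (k m j : ℕ), lastIn A lo k m = some j → lo ≤ j ∧ j < k := by
  intro k
  induction k with
  | zero => intro m j h; simp [lastIn] at h
  | succ k ih =>
    intro m j h
    rw [lastIn] at h
    split_ifs at h with hc
    · cases h; omega
    · have := ih m j h; omega

theorem subv_lastIn_eq (A : List Int) (f : ℕ → Int) (lo : ℕ) (hf : ∀ j < lo, f j = 0) :
    ∀ (k m : ℕ), subv f (lastIn A lo k m) = subv f (lastIn A 0 k m) := by
  intro k
  induction k with
  | zero => intro m; rfl
  | succ k ih =>
    intro m
    rw [lastIn, lastIn]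
    by_cases hm : wa A k = m
    · by_cases hlo : lo ≤ k
      · rw [if_pos ⟨hlo, hm⟩, if_pos ⟨Nat.zero_le _, hm⟩]
      · rw [if_neg (by tauto), if_pos ⟨Nat.zero_le _, hm⟩,
          lastIn_none_of_le A lo k m (by omega)]
        simp [subv, hf k (by omega)]
    · rw [if_neg (by tauto), if_neg (by tauto)]; exact ih m

theorem Gof_zero (A : List Int) (F : ℕ → Int) (lo : ℕ) (hF : ∀ j < lo, F j = 0) :
    ∀ k, k ≤ lo → Gof A F k = 0 := by
  intro k
  induction k with
  | zero => intro _; rfl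
  | succ k ih =>
    intro hk
    rw [Gof, ih (by omega), hF k (by omega)]
    have hs : subv F (lastIn A 0 k (wa A k)) = 0 := by
      cases hli : lastIn A 0 k (wa A k) with
      | none => rfl
      | some j =>
        have := lastIn_bounds A 0 k (wa A k) j hli
        exact hF j (by omega)
    rw [hs]; ring

-- reading / writing the spec arrays at a value v (bounds from InB)
theorem getD_spec (A : List Int) (g : ℕ → Int) (v : Int)
    (h1 : -((A.length : Int) + 1) ≤ v) (h2 : v ≤ (A.length : Int)) :
    PySem.List.pyGetD ((List.range (A.length + 1)).map g) v 0
      = g (wIdx (A.length + 1) v) := by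
  rw [pyGetD_w _ (A.length + 1) v 0 (by simp) (by push_cast; omega) (by push_cast; omega)]
  exact PySem.List.getD_map_range g _ _ _
    (wIdx_lt _ _ (by push_cast; omega) (by push_cast; omega) (by omega))

theorem getDB_spec (A : List Int) (g : ℕ → Bool) (v : Int)
    (h1 : -((A.length : Int) + 1) ≤ v) (h2 : v ≤ (A.length : Int)) :
    PySem.List.pyGetD ((List.range (A.length + 1)).map g) v false
      = g (wIdx (A.length + 1) v) := by
  rw [pyGetD_w _ (A.length + 1) v false (by simp) (by push_cast; omega) (by push_cast; omega)]
  exact PySem.List.getD_map_range g _ _ _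
    (wIdx_lt _ _ (by push_cast; omega) (by push_cast; omega) (by omega))

theorem setD_spec {α : Type} (A : List Int) (g : ℕ → α) (v : Int) (x : α)
    (h1 : -((A.length : Int) + 1) ≤ v) (h2 : v ≤ (A.length : Int)) :
    PySem.List.pySetD ((List.range (A.length + 1)).map g) v x
      = (List.range (A.length + 1)).map
          (fun m => if m = wIdx (A.length + 1) v then x else g m) := by
  rw [pySetD_w _ (A.length + 1) v x (by simp) (by push_cast; omega) (by push_cast; omega)]
  exact set_map_range _ g _ x

theorem replicate_eq_map_range {α : Type} (N : ℕ) (c : α) :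
    List.replicate N c = (List.range N).map (fun _ => c) := by
  simp [List.map_const']

-- B-side invariant: state of the fused fold after the first k elements
theorem alt_inv (A : List Int) (hv : InB A) :
    ∀ k, k ≤ A.length →
      (A.take k).foldl altStep
        (0, 0, 0, List.replicate (A.length + 1) false,
          List.replicate (A.length + 1) 0, List.replicate (A.length + 1) 0)
      = (SS A k, PP A k, TT A k, seenSpec A k, subSpec A (SS A) k, subSpec A (PP A) k) := by
  intro k
  induction k with
  | zero =>
    intro _
    simp [seenSpec, subSpec, lastIn, subv, SS, PP, TT, Gof, List.map_const']
  | succ k ih =>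
    intro hk
    have hklt : k < A.length := by omega
    have hb := hv k hklt
    have hget : A[k]? = some (aAt A k) := by
      simp [aAt, List.getD_eq_getElem?_getD, List.getElem?_eq_getElem hklt]
    rw [List.take_add_one, List.foldl_append, ih (by omega), hget]
    simp only [Option.toList_some, List.foldl_cons, List.foldl_nil, altStep,
      seenSpec, subSpec]
    rw [getDB_spec A _ _ hb.1 hb.2, getD_spec A _ _ hb.1 hb.2, getD_spec A _ _ hb.1 hb.2,
      setD_spec A _ _ _ hb.1 hb.2, setD_spec A _ _ _ hb.1 hb.2, setD_spec A _ _ _ hb.1 hb.2]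
    simp only [Prod.mk.injEq]
    refine ⟨?_, ?_, ?_, ?_, ?_, ?_⟩
    · rw [SS, wa]
      by_cases h : (lastIn A 0 k (wIdx (A.length + 1) (aAt A k))).isSome = true <;> simp [h]
    · simp [PP, Gof, wa]
    · simp [TT, Gof, wa]
    · congr 1
      funext m
      rw [lastIn]
      by_cases h : m = wIdx (A.length + 1) (aAt A k)
      · rw [if_pos h, if_pos ⟨Nat.zero_le _, by simp [wa, h]⟩]; simp
      · rw [if_neg h, if_neg (by rintro ⟨-, hc⟩; simp [wa] at hc; exact h hc.symm)]
    · congr 1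
      funext m
      rw [lastIn]
      by_cases h : m = wIdx (A.length + 1) (aAt A k)
      · rw [if_pos h, if_pos ⟨Nat.zero_le _, by simp [wa, h]⟩]; simp [subv]
      · rw [if_neg h, if_neg (by rintro ⟨-, hc⟩; simp [wa] at hc; exact h hc.symm)]
    · congr 1
      funext m
      rw [lastIn]
      by_cases h : m = wIdx (A.length + 1) (aAt A k)
      · rw [if_pos h, if_pos ⟨Nat.zero_le _, by simp [wa, h]⟩]; simp [subv]
      · rw [if_neg h, if_neg (by rintro ⟨-, hc⟩; simp [wa] at hc; exact h hc.symm)]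

-- A-side pass 1: the singles loop
theorem pass1_inv (A : List Int) (hv : InB A) (hn : 1 ≤ A.length) :
    ∀ k, 1 ≤ k → k ≤ A.length →
      (PySem.List.pyRange 1 (k : Int) 1).foldl (singlesStep A)
        (PySem.List.pySetD (List.replicate A.length 0) 0 1,
         PySem.List.pySetD (List.replicate (A.length + 1) 0) (PySem.List.pyGetD A 0 0) 1)
      = (arrSpec A (SS A) k, visSpec A k) := by
  intro k hk1
  induction k, hk1 using Nat.le_induction with
  | base =>
    intro _
    have h0 : 0 < A.length := by omega
    have hb := hv 0 h0
    rw [show ((1 : ℕ) : Int) = 1 by norm_num, PySem.List.pyRange_one_eq_nil (by norm_num)]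
    rw [List.foldl_nil]
    have hA0 : PySem.List.pyGetD A 0 0 = aAt A 0 := by
      rw [show (0 : Int) = ((0 : ℕ) : Int) from rfl, PySem.List.pyGetD_natCast]
      rfl
    rw [hA0, PySem.List.pySetD_of_nonneg _ _ (by norm_num),
      replicate_eq_map_range A.length (0 : Int),
      replicate_eq_map_range (A.length + 1) (0 : Int),
      setD_spec A _ _ _ hb.1 hb.2, set_map_range]
    simp only [Prod.mk.injEq]
    refine ⟨?_, ?_⟩
    · unfold arrSpec
      congr 1
      funext i
      by_cases h : i = (0 : Int).toNat
      · rw [if_pos h, if_pos (by omega)]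
        simp [h, SS, lastIn]
      · rw [if_neg h, if_neg (by omega)]
    · unfold visSpec
      congr 1
      funext m
      by_cases h : wIdx (A.length + 1) (aAt A 0) = m
      · simp [lastIn, wa, h]
      · simp [lastIn, wa, h, Ne.symm h]
  | succ k hk1 ih =>
    intro hk
    have hklt : k < A.length := by omega
    have hb := hv k hklt
    have hcast : ((k + 1 : ℕ) : Int) = (k : Int) + 1 := by push_cast; ring
    rw [hcast, PySem.List.pyRange_one_succ_right (by omega), List.foldl_append,
      ih (by omega), List.foldl_cons, List.foldl_nil]
    have hAk : PySem.List.pyGetD A (k : Int) 0 = aAt A k := by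
      rw [PySem.List.pyGetD_natCast]
      rfl
    have hread : PySem.List.pyGetD (visSpec A k) (aAt A k) 0
        = (if (lastIn A 0 k (wa A k)).isSome then (1 : Int) else 0) := by
      unfold visSpec
      rw [getD_spec A _ _ hb.1 hb.2]
      simp [wa]
    have hm1 : ((k : Int) - 1) = ((k - 1 : ℕ) : Int) := by omega
    have hsread : PySem.List.pyGetD (arrSpec A (SS A) k) ((k : Int) - 1) 0 = SS A k := by
      unfold arrSpec
      rw [hm1, PySem.List.pyGetD_natCast,
        PySem.List.getD_map_range _ _ _ _ (by omega), if_pos (by omega),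
        show k - 1 + 1 = k by omega]
    have hset : ∀ v : Int, PySem.List.pySetD (arrSpec A (SS A) k) (k : Int) v
        = (List.range A.length).map
            (fun i => if i = k then v else if i < k then SS A (i + 1) else 0) := by
      intro v
      unfold arrSpec
      rw [PySem.List.pySetD_natCast, set_map_range]
    unfold singlesStep
    rw [hAk, hread]
    by_cases hseen : (lastIn A 0 k (wa A k)).isSome
    · rw [if_pos (by simp [hseen]), hsread, hset]
      simp only [Prod.mk.injEq]
      refine ⟨?_, ?_⟩
      · unfold arrSpec
        congr 1
        funext i
        by_cases h : i = k
        · rw [if_pos h, if_pos (by omega), show i + 1 = k + 1 by omega, SS, hseen]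
          simp
        · rw [if_neg h]
          by_cases h2 : i < k
          · rw [if_pos h2, if_pos (by omega)]
          · rw [if_neg h2, if_neg (by omega)]
      · unfold visSpec
        congr 1
        funext m
        rw [lastIn]
        by_cases h : wa A k = m
        · rw [h] at hseen
          simp [h, hseen]
        · simp [h]
    · rw [if_neg (by simp [hseen]), hsread, hset]
      simp only [Prod.mk.injEq]
      refine ⟨?_, ?_⟩
      · unfold arrSpec
        congr 1
        funext i
        by_cases h : i = k
        · rw [if_pos h, if_pos (by omega), show i + 1 = k + 1 by omega, SS]
          simp [hseen]
        · rw [if_neg h]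
          by_cases h2 : i < k
          · rw [if_pos h2, if_pos (by omega)]
          · rw [if_neg h2, if_neg (by omega)]
      · unfold visSpec
        rw [setD_spec A _ _ _ hb.1 hb.2]
        congr 1
        funext m
        rw [lastIn]
        by_cases h : wIdx (A.length + 1) (aAt A k) = m
        · simp [wa, h]
        · simp [wa, h, Ne.symm h]

-- A-side passes 2 and 3: getTuples on a fully-computed previous-level array
theorem getTuples_inv (A : List Int) (hv : InB A) (F : ℕ → Int) (lo : ℕ)
    (hlo1 : 1 ≤ lo) (_hlon : lo ≤ A.length) (hF : ∀ j < lo, F j = 0) :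
    ∀ k, lo ≤ k → k ≤ A.length →
      (PySem.List.pyRange (lo : Int) (k : Int) 1).foldl
        (getTuplesStep A ((List.range A.length).map (fun i => F (i + 1))))
        (List.replicate A.length 0, List.replicate (A.length + 1) (-1))
      = (arrSpec A (Gof A F) k, posSpec A lo k) := by
  intro k hkl
  induction k, hkl using Nat.le_induction with
  | base =>
    intro _
    rw [PySem.List.pyRange_one_eq_nil (by omega), List.foldl_nil]
    simp only [Prod.mk.injEq]
    refine ⟨?_, ?_⟩
    · rw [replicate_eq_map_range A.length (0 : Int)]
      unfold arrSpec
      congr 1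
      funext i
      by_cases h : i < lo
      · rw [if_pos h, Gof_zero A F lo hF (i + 1) (by omega)]
      · rw [if_neg h]
    · rw [replicate_eq_map_range (A.length + 1) (-1 : Int)]
      unfold posSpec
      congr 1
      funext m
      rw [lastIn_none_of_le A lo lo m (le_refl lo)]
      rfl
  | succ k hkl ih =>
    intro hk
    have hklt : k < A.length := by omega
    have hb := hv k hklt
    have hcast : ((k + 1 : ℕ) : Int) = (k : Int) + 1 := by push_cast; ring
    rw [hcast, PySem.List.pyRange_one_succ_right (by omega), List.foldl_append,
      ih (by omega), List.foldl_cons, List.foldl_nil]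
    have hAk : PySem.List.pyGetD A (k : Int) 0 = aAt A k := by
      rw [PySem.List.pyGetD_natCast]
      rfl
    have hposread : PySem.List.pyGetD (posSpec A lo k) (aAt A k) 0
        = (lastIn A lo k (wa A k)).elim (-1) (fun j => (j : Int)) := by
      unfold posSpec
      rw [getD_spec A _ _ hb.1 hb.2]
      simp [wa]
    have hm1 : ((k : Int) - 1) = ((k - 1 : ℕ) : Int) := by omega
    have hrread : PySem.List.pyGetD (arrSpec A (Gof A F) k) ((k : Int) - 1) 0
        = Gof A F k := by
      unfold arrSpec
      rw [hm1, PySem.List.pyGetD_natCast,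
        PySem.List.getD_map_range _ _ _ _ (by omega), if_pos (by omega),
        show k - 1 + 1 = k by omega]
    have htread : PySem.List.pyGetD ((List.range A.length).map (fun i => F (i + 1)))
        ((k : Int) - 1) 0 = F k := by
      rw [hm1, PySem.List.pyGetD_natCast,
        PySem.List.getD_map_range _ _ _ _ (by omega), show k - 1 + 1 = k by omega]
    have hset : ∀ v : Int, PySem.List.pySetD (arrSpec A (Gof A F) k) (k : Int) v
        = (List.range A.length).map
            (fun i => if i = k then v else if i < k then Gof A F (i + 1) else 0) := by
      intro v
      unfold arrSpec
      rw [PySem.List.pySetD_natCast, set_map_range]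
    have hposset : PySem.List.pySetD (posSpec A lo k) (aAt A k) (k : Int)
        = posSpec A lo (k + 1) := by
      unfold posSpec
      rw [setD_spec A _ _ _ hb.1 hb.2]
      congr 1
      funext m
      rw [lastIn]
      by_cases h : m = wIdx (A.length + 1) (aAt A k)
      · rw [if_pos h, if_pos ⟨by omega, h.symm⟩]
        rfl
      · rw [if_neg h, if_neg (by rintro ⟨-, hc⟩; exact h hc.symm)]
    have hsubv : subv F (lastIn A lo k (wa A k)) = subv F (lastIn A 0 k (wa A k)) :=
      subv_lastIn_eq A F lo hF k (wa A k)
    have harr : ∀ v : Int, v = Gof A F (k + 1) →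
        (List.range A.length).map
            (fun i => if i = k then v else if i < k then Gof A F (i + 1) else 0)
          = arrSpec A (Gof A F) (k + 1) := by
      intro v hvv
      unfold arrSpec
      congr 1
      funext i
      by_cases h : i = k
      · rw [if_pos h, if_pos (by omega), show i + 1 = k + 1 by omega, hvv]
      · rw [if_neg h]
        by_cases h2 : i < k
        · rw [if_pos h2, if_pos (by omega)]
        · rw [if_neg h2, if_neg (by omega)]
    simp only [getTuplesStep]
    rw [hAk, hposread]
    cases hli : lastIn A lo k (wa A k) with
    | none =>
      rw [if_pos (by norm_num), hrread, htread, hset]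
      simp only [Prod.mk.injEq]
      refine ⟨harr _ ?_, hposset⟩
      rw [Gof, ← hsubv, hli]
      simp [subv]
    | some j =>
      have hjb := lastIn_bounds A lo k (wa A k) j hli
      have hjm1 : ((j : Int) - 1) = ((j - 1 : ℕ) : Int) := by omega
      rw [if_neg (by simp), hrread, htread, hset]
      simp only [Prod.mk.injEq, Option.elim_some]
      refine ⟨?_, hposset⟩
      rw [hjm1, PySem.List.pyGetD_natCast,
        PySem.List.getD_map_range _ _ _ _ (by omega), show j - 1 + 1 = j by omega]
      refine harr _ ?_
      rw [Gof, ← hsubv, hli]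
      simp [subv]

theorem arrSpec_full (A : List Int) (G : ℕ → Int) :
    arrSpec A G A.length = (List.range A.length).map (fun i => G (i + 1)) := by
  unfold arrSpec
  apply List.map_congr_left
  intro i hi
  rw [if_pos (List.mem_range.mp hi)]

theorem getTuples_spec (A : List Int) (hv : InB A) (F : ℕ → Int) (lo : ℕ)
    (hlo1 : 1 ≤ lo) (hlon : lo ≤ A.length) (hF : ∀ j < lo, F j = 0) :
    getTuples A ((List.range A.length).map (fun i => F (i + 1))) ((lo : Int) + 1)
      = (List.range A.length).map (fun i => Gof A F (i + 1)) := by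
  simp only [getTuples]
  have hcast : (lo : Int) + 1 - 1 = (lo : Int) := by ring
  rw [hcast, getTuples_inv A hv F lo hlo1 hlon hF A.length hlon (le_refl _)]
  exact arrSpec_full A (Gof A F)


theorem take_all_foldl (A : List Int) :
    A.foldl altStep
      (0, 0, 0, List.replicate (A.length + 1) false,
        List.replicate (A.length + 1) 0, List.replicate (A.length + 1) 0)
    = (A.take A.length).foldl altStep
      (0, 0, 0, List.replicate (A.length + 1) false,
        List.replicate (A.length + 1) 0, List.replicate (A.length + 1) 0) := by
  rw [List.take_length]

-- ===== VERDICT (by name: the statement is the Claim_ definition above) =====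
theorem solution_spec : Claim_equal_solution := by
  unfold Claim_equal_solution
  intro A _ hpre
  unfold Spec_solution
  by_cases h3 : (A.length : Int) < 3
  · simp only [solution, solution_alt]
    rw [if_pos h3, if_pos (by omega)]
  · have hn3 : 3 ≤ A.length := by omega
    have hv : InB A := by
      intro j hj
      have hmem : aAt A j ∈ A := by
        unfold aAt
        rw [List.getD_eq_getElem?_getD, List.getElem?_eq_getElem hj]
        exact List.getElem_mem hj
      exact hpre hn3 _ hmem
    have hSS0 : ∀ j < 1, SS A j = 0 := by
      intro j hj
      interval_cases j
      rfl
    have hPP0 : ∀ j < 2, PP A j = 0 := by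
      intro j hj
      exact Gof_zero A (SS A) 1 hSS0 j (by omega)
    simp only [solution, solution_alt]
    rw [if_neg h3, if_neg (by omega)]
    have h1 := pass1_inv A hv (by omega) A.length (by omega) (le_refl _)
    rw [h1]
    have harr1 := arrSpec_full A (SS A)
    have h2 := getTuples_spec A hv (SS A) 1 (le_refl 1) (by omega) hSS0
    have h3' := getTuples_spec A hv (PP A) 2 (by omega) (by omega) hPP0
    rw [show ((2 : Int)) = ((1 : ℕ) : Int) + 1 by norm_num]
    rw [show ((3 : Int)) = ((2 : ℕ) : Int) + 1 by norm_num]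
    simp only
    rw [harr1, h2]
    rw [show (fun i => Gof A (SS A) (i + 1)) = (fun i => PP A (i + 1)) from rfl, h3']
    have hne : ((List.range A.length).map (fun i => Gof A (PP A) (i + 1))) ≠ [] := by
      simp only [ne_eq, List.map_eq_nil_iff, List.range_eq_nil]
      omega
    rw [PySem.List.pyGetD_neg_one _ 0 hne, List.getLast_eq_getElem]
    simp only [List.length_map, List.length_range, List.getElem_map, List.getElem_range]
    rw [take_all_foldl, alt_inv A hv A.length (le_refl _)]
    simp only
    rw [show A.length - 1 + 1 = A.length by omega]
    rfl
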